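-- pv_equiv track=rewrite | github.com/qkrrjs0811/memit | falcon/falcon_util.py | is_symbol
-- ===== SOURCE A (Python) =====
-- import os, sys, json, string, re
--
-- PUNCTUATION = string.punctuation
--
-- def is_empty(text: str, trim_flag=True):
--     if text is None:
--         return True
--
--     if trim_flag:
--         text = text.strip()
--
--     if len(text) == 0:
--         return True
--
--     return False
--
-- def is_symbol(text: str, symbols=PUNCTUATION):
--     if is_empty(text):
--         return False
--
--     for c in text:
--         if c == ' ' or c == '\t' or c == '\n':
--             continue
--         if not c in symbols:
--             return False
--
--     return True
-- ===== SOURCE B (Python) =====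
-- import string
--
-- def is_symbol(text, symbols=string.punctuation):
--     if text is None or not text.strip():
--         return False
--     remaining = list(text)
--     for ch in symbols + ' \t\n':
--         remaining = [c for c in remaining if c != ch]
--     return not remaining
-- ===== Notes on version B (the rewrite author's own statement) =====
-- stated objective: alternative
-- what changed: Inverts the traversal: instead of scanning text char by char with early exit, B loops over the allowed alphabet (symbols plus the three whitespace chars), deleting each from the text, and returns whether nothing remains.
import Mathlib
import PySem

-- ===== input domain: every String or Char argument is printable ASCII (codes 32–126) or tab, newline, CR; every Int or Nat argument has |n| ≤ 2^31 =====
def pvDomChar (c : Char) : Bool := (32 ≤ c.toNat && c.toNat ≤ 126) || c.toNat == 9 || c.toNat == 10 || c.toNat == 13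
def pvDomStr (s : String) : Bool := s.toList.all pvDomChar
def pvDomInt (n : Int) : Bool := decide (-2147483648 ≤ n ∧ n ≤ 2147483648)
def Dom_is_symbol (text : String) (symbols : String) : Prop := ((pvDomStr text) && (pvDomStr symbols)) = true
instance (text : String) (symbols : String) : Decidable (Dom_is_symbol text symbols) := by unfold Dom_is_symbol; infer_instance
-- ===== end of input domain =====

-- B inverts the traversal: it loops over the allowed alphabet (symbols + ' \t\n'),
-- deleting each character from the text, and returns whether nothing remains; objective: alternative.

-- ===== PORT A =====
-- is_empty(text, trim_flag=True); the 'text is None' branch cannot fire for a String input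
def is_empty_port (text : String) (trim_flag : Bool) : Bool :=
  let text := if trim_flag then PySem.Str.strip text else text
  PySem.Str.len text == 0

-- the for-loop over text's characters with early 'return False'
-- ('c in symbols' for a single character c is character membership)
def isSymbolLoop (symbols : String) : List Char → Bool
  | [] => true
  | c :: rest =>
    if c == ' ' || c == '\t' || c == '\n' then isSymbolLoop symbols rest
    else if !(symbols.toList.contains c) then false
    else isSymbolLoop symbols rest

def is_symbol (text : String) (symbols : String) : Bool :=
  if is_empty_port text true then false
  else isSymbolLoop symbols text.toList

-- ===== PORT B =====
def is_symbol_alt (text : String) (symbols : String) : Bool :=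
  if PySem.Str.len (PySem.Str.strip text) == 0 then false
  else
    let remaining :=
      (symbols.toList ++ [' ', '\t', '\n']).foldl
        (fun rem ch => rem.filter (fun c => c != ch)) text.toList
    remaining.isEmpty

-- ===== PRECONDITION & SPEC =====
def Spec_is_symbol (text : String) (symbols : String) (out : Bool) : Prop := out = is_symbol_alt text symbols
instance (text : String) (symbols : String) (out : Bool) : Decidable (Spec_is_symbol text symbols out) := by unfold Spec_is_symbol; infer_instance

-- ===== CLAIM (what is proved, stated in full; the proofs are below) =====
def Claim_equal_is_symbol : Prop := ∀ (text : String) (symbols : String), Dom_is_symbol text symbols → Spec_is_symbol text symbols (is_symbol text symbols)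

-- ===== LEMMAS AND PROOFS =====

theorem loop_eq_all (symbols : String) (l : List Char) :
    isSymbolLoop symbols l
      = l.all (fun c => c == ' ' || c == '\t' || c == '\n' || symbols.toList.contains c) := by
  induction l with
  | nil => rfl
  | cons c rest ih =>
    simp only [isSymbolLoop, List.all_cons, ih]
    cases h : (c == ' ' || c == '\t' || c == '\n') <;>
      cases h2 : symbols.toList.contains c <;> simp

theorem foldl_filter_eq (L : List Char) (rem : List Char) :
    L.foldl (fun rem ch => rem.filter (fun c => c != ch)) rem
      = rem.filter (fun c => !(L.contains c)) := by
  induction L generalizing rem with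
  | nil => simp
  | cons ch L ih =>
    simp only [List.foldl_cons, ih, List.filter_filter]
    apply List.filter_congr
    intro c _
    by_cases h : c = ch <;> simp [h]

theorem delete_eq_all (l : List Char) (syms : List Char) :
    ((syms ++ [' ', '\t', '\n']).foldl
        (fun rem ch => rem.filter (fun c => c != ch)) l).isEmpty
      = l.all (fun c => c == ' ' || c == '\t' || c == '\n' || syms.contains c) := by
  rw [foldl_filter_eq, Bool.eq_iff_iff, List.isEmpty_iff, List.filter_eq_nil_iff]
  simp only [List.all_eq_true, Bool.not_eq_eq_eq_not, Bool.not_true, List.contains_eq_mem,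
    List.mem_append, List.mem_cons, List.not_mem_nil, Bool.or_eq_true, beq_iff_eq,
    decide_eq_true_eq, decide_eq_false_iff_not, not_or, or_false]
  constructor
  · intro h c hc
    by_contra hn
    exact (h c hc) ⟨fun hm => hn (by tauto), by tauto⟩
  · intro h c hc hn
    have := h c hc
    tauto

-- ===== VERDICT (by name: the statement is the Claim_ definition above) =====
theorem is_symbol_spec : Claim_equal_is_symbol := by
  intro text symbols _
  unfold Spec_is_symbol is_symbol is_symbol_alt is_empty_port
  simp only [loop_eq_all, delete_eq_all]
  by_cases h : PySem.Str.len (PySem.Str.strip text) == 0 <;> simp [h]
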